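-- pv_equiv track=rewrite | github.com/Nnorto/Vigenerecod | cycletext.py | cycl
-- ===== SOURCE A (Python) =====
-- def cycl(text, key):
--     """
--     Эта функция нужна для циклического наложения ключа Виженера на текст пользователя.
--     :param text: Текст, который будет зашифрован.
--     :param key: Ключ.
--     :return: Строка с ключом длиной как у t
--     """
--     text = text.upper()
--     key = key.upper()
--     ns = ''
--     count = 0
--     for i in range(len(text)):
--         if not text[i].isalpha():
--             ns += text[i]
--         else:
--             ns += key[count]
--             count += 1
--             if count == len(key):
--                 count = 0
--     return ns
-- ===== SOURCE B (Python) =====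
-- def cycl(text, key):
--     t = text.upper()
--     k = key.upper()
--     n = sum(map(str.isalpha, t))
--     ks = (k * (n // len(k) + 1))[:n] if n else ''
--     it = iter(ks)
--     return ''.join(next(it) if c.isalpha() else c for c in t)
-- ===== Notes on version B (the rewrite author's own statement) =====
-- stated objective: alternative
-- what changed: B precomputes the number of letters, builds the entire key stream at once by string repetition and slicing, and merges it into the text with an iterator in one join, instead of A's single pass that grows a string while cycling a counter with reset.
import Mathlib
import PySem

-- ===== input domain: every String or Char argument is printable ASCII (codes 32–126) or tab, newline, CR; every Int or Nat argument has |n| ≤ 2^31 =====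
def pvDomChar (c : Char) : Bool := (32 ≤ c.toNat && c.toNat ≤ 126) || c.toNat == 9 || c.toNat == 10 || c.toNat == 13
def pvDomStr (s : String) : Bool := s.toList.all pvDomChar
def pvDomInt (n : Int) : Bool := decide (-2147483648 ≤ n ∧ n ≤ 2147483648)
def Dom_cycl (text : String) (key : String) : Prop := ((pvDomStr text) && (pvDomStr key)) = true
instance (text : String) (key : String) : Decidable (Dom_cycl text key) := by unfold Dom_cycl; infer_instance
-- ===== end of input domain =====

-- B precomputes the whole key stream by string repetition and slicing, then merges it with
-- the text in one join, instead of A's per-character counter with reset; same return value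
-- wherever A returns (Pre_ excludes the empty-key-with-letters inputs where A raises).


-- ===== PORT A =====
-- ns += … over range(len(text)) becomes a foldl over the uppercased character list with
-- state (ns, count); key[count] is in range on every input Pre_ admits, so it is ported
-- as getD (the default is never read inside Pre_).
def cycl (text : String) (key : String) : String :=
  let t := PySem.Chars.upper text.toList
  let k := PySem.Chars.upper key.toList
  let r := t.foldl (fun (st : List Char × Nat) ch =>
      if !(PySem.Chars.isalpha ch) then (st.1 ++ [ch], st.2)
      else (st.1 ++ [k.getD st.2 'A'], if st.2 + 1 = k.length then 0 else st.2 + 1))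
    ([], 0)
  String.mk r.1

-- ===== PORT B =====
-- next(it) on the keystream iterator: the generator expression becomes structural
-- recursion over the text that consumes the head of the remaining keystream
-- (headD: inside Pre_ the stream is never exhausted, so the default is never read).
def cyclConsume : List Char → List Char → List Char
  | _, [] => []
  | ks, c :: r =>
      if PySem.Chars.isalpha c then ks.headD 'A' :: cyclConsume ks.tail r
      else c :: cyclConsume ks r

-- sum(map(str.isalpha, t)) → countP; k * m → flatten (replicate m k); [:n] → take n.
def cycl_alt (text : String) (key : String) : String :=
  let t := PySem.Chars.upper text.toList
  let k := PySem.Chars.upper key.toList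
  let n := t.countP PySem.Chars.isalpha
  let ks := if n = 0 then [] else ((List.replicate (n / k.length + 1) k).flatten).take n
  String.mk (cyclConsume ks t)

-- ===== PRECONDITION & SPEC =====
-- Pre_ excludes exactly the inputs where Python A raises IndexError (key[count] with an
-- empty key while text contains a letter); Python B raises ZeroDivisionError there.
def Pre_cycl (text : String) (key : String) : Prop :=
  key ≠ "" ∨ text.toList.all (fun c => !PySem.Chars.isalpha c) = true
instance (text : String) (key : String) : Decidable (Pre_cycl text key) := by
  unfold Pre_cycl; infer_instance
def pvWitness_cycl : String × String := ("Attack at dawn!", "lemon")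

def Spec_cycl (text : String) (key : String) (out : String) : Prop := out = cycl_alt text key
instance (text : String) (key : String) (out : String) : Decidable (Spec_cycl text key out) := by unfold Spec_cycl; infer_instance

-- ===== CLAIM (what is proved, stated in full; the proofs are below) =====
def Claim_equal_cycl : Prop := ∀ (text : String) (key : String), Dom_cycl text key → Pre_cycl text key → Spec_cycl text key (cycl text key)

-- ===== LEMMAS AND PROOFS =====

-- the common value both programs compute: the cipher text, recursively over the text
def spine (k : List Char) : List Char → Nat → List Char
  | [], _ => []
  | ch :: r, c =>
      if PySem.Chars.isalpha ch then
        k.getD c 'A' :: spine k r (if c + 1 = k.length then 0 else c + 1)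
      else ch :: spine k r c

-- A's fold appends spine to the accumulator
theorem foldA_eq (k : List Char) :
    ∀ (t : List Char) (acc : List Char) (c : Nat), ∃ c',
      t.foldl (fun (st : List Char × Nat) ch =>
        if !(PySem.Chars.isalpha ch) then (st.1 ++ [ch], st.2)
        else (st.1 ++ [k.getD st.2 'A'], if st.2 + 1 = k.length then 0 else st.2 + 1))
        (acc, c) = (acc ++ spine k t c, c') := by
  intro t
  induction t with
  | nil => intro acc c; exact ⟨c, by simp [spine]⟩
  | cons ch r ih =>
    intro acc c
    by_cases h : PySem.Chars.isalpha ch = true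
    · obtain ⟨c', hc'⟩ := ih (acc ++ [k.getD c 'A']) (if c + 1 = k.length then 0 else c + 1)
      exact ⟨c', by simpa [List.foldl_cons, h, spine] using hc'⟩
    · obtain ⟨c', hc'⟩ := ih (acc ++ [ch]) c
      exact ⟨c', by simpa [List.foldl_cons, h, spine] using hc'⟩

-- the cyclic key stream: m characters of k starting at offset c, with A's reset rule
def streamFrom (k : List Char) : Nat → Nat → List Char
  | _, 0 => []
  | c, m + 1 => k.getD c 'A' :: streamFrom k (if c + 1 = k.length then 0 else c + 1) m

-- consuming the exact stream (plus any unread suffix) reproduces spine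
theorem consume_stream (k : List Char) :
    ∀ (t : List Char) (c : Nat) (rest : List Char),
      cyclConsume (streamFrom k c (t.countP PySem.Chars.isalpha) ++ rest) t = spine k t c := by
  intro t
  induction t with
  | nil => intro c rest; simp [cyclConsume, spine]
  | cons ch r ih =>
    intro c rest
    by_cases h : PySem.Chars.isalpha ch = true
    · simp [h, streamFrom, cyclConsume, spine, ih]
    · simp [h, cyclConsume, spine, ih]

-- the repeated-and-truncated key equals the stream, as long as enough copies are present
theorem stream_take (k : List Char) :
    ∀ (m c q : Nat), c < k.length → m ≤ (k.length - c) + k.length * q →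
      (k.drop c ++ (List.replicate q k).flatten).take m = streamFrom k c m := by
  intro m
  induction m with
  | zero => intro c q _ _; simp [streamFrom]
  | succ m ih =>
    intro c q hc hle
    rw [List.drop_eq_getElem_cons hc]
    simp only [List.cons_append, List.take_succ_cons, streamFrom,
      List.getD_eq_getElem k 'A' hc]
    congr 1
    by_cases hcl : c + 1 = k.length
    · rw [hcl, List.drop_length, List.nil_append]
      cases q with
      | zero =>
        have hm : m = 0 := by omega
        subst hm; simp [streamFrom]
      | succ q' =>
        rw [if_pos rfl]
        have hb : m ≤ k.length - 0 + k.length * q' := by rw [Nat.mul_succ] at hle; omega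
        simpa using ih 0 q' (by omega) hb
    · have hc1 : c + 1 < k.length := by omega
      rw [if_neg hcl, ih (c + 1) q hc1 (by omega)]

-- B's keystream for a nonempty key is streamFrom k 0 n
theorem keystream_eq (k : List Char) (hk : k ≠ []) (n : Nat) :
    ((List.replicate (n / k.length + 1) k).flatten).take n = streamFrom k 0 n := by
  have hlen : 0 < k.length := List.length_pos_iff.mpr hk
  rw [List.replicate_succ, List.flatten_cons, show (k : List Char) = k.drop 0 by simp]
  refine stream_take k n 0 (n / k.length) hlen ?_
  have h1 := Nat.div_add_mod n k.length
  have h2 := Nat.mod_lt n hlen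
  omega

-- with an empty key both programs write the default 'A' at every letter
theorem spine_nilkey : ∀ (t : List Char) (c : Nat),
    spine [] t c = cyclConsume [] t := by
  intro t
  induction t with
  | nil => simp [spine, cyclConsume]
  | cons ch r ih =>
    intro c
    by_cases h : PySem.Chars.isalpha ch = true <;>
      simp [spine, cyclConsume, h, ih]

theorem cycl_alt_eq_spine (text key : String) :
    cycl_alt text key
      = String.mk (spine (PySem.Chars.upper key.toList) (PySem.Chars.upper text.toList) 0) := by
  unfold cycl_alt
  dsimp only
  generalize PySem.Chars.upper text.toList = t
  generalize PySem.Chars.upper key.toList = k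
  by_cases hn : t.countP PySem.Chars.isalpha = 0
  · rw [if_pos hn]
    have h := consume_stream k t 0 []
    rw [hn] at h
    simpa [streamFrom] using congrArg String.mk h
  · rw [if_neg hn]
    rcases eq_or_ne k [] with hke | hke
    · subst hke
      simp only [List.length_nil, Nat.div_zero, List.replicate_succ, List.replicate_zero,
        List.flatten_cons, List.flatten_nil, List.append_nil, List.take_nil]
      exact congrArg String.mk (spine_nilkey t 0).symm
    · rw [keystream_eq k hke]
      have h := consume_stream k t 0 []
      rw [List.append_nil] at h
      exact congrArg String.mk h

-- ===== VERDICT (by name: the statement is the Claim_ definition above) =====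
theorem cycl_spec : Claim_equal_cycl := by
  intro text key _ _
  unfold Spec_cycl
  rw [cycl_alt_eq_spine]
  unfold cycl
  obtain ⟨c', hA⟩ := foldA_eq (PySem.Chars.upper key.toList)
    (PySem.Chars.upper text.toList) [] 0
  simp only [hA, List.nil_append]
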